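-- pv_equiv track=rewrite | github.com/wherby/code | contest/00000c315d89/d101/q3/t3.py | makeSubKSumEqual
-- ===== SOURCE A (Python) =====
-- from typing import List, Tuple, Optional
-- import math
--
-- def makeSubKSumEqual(arr: List[int], k: int) -> int:
--     n = len(arr)
--     m = math.gcd(n,k)
--     k = m
--     if n%k ==0:
--         mid = n//k //2
--         ls =[[] for _ in range(n)]
--         for i,a in enumerate(arr):
--             ls[i%k].append(a)
--         for i in range(k):
--             ls[i].sort()
--         acc =0
--         for i in range(k):
--             for a in ls[i]:
--                 acc += abs(ls[i][mid] - a)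
--         return acc
--     else:
--         arr.sort()
--         mid = n //2
--         acc =0
--         for a in arr:
--             acc +=abs(arr[mid]-a)
--         return acc
-- ===== SOURCE B (Python) =====
-- import math
--
-- def makeSubKSumEqual(arr, k):
--     # Selection, not sorting: the rank-(L//2) element of each residue-class
--     # group is found by iterative 3-way-partition quickselect (middle pivot),
--     # then the costs |median - a| are summed over the UNSORTED group.
--     def select(xs, j):
--         while True:
--             p = xs[len(xs) // 2]
--             lt = [a for a in xs if a < p]
--             gt = [a for a in xs if a > p]
--             if j < len(lt):
--                 xs = lt
--             elif j < len(xs) - len(gt):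
--                 return p
--             else:
--                 j -= len(xs) - len(gt)
--                 xs = gt
--
--     g = math.gcd(len(arr), k)
--     total = 0
--     for r in range(g):
--         grp = arr[r::g]
--         med = select(grp, len(grp) // 2)
--         total += sum(abs(med - a) for a in grp)
--     return total
-- ===== Notes on version B (the rewrite author's own statement) =====
-- stated objective: faster
-- what changed: Replaces A's bucket lists and per-bucket full sorts by a 3-way-partition quickselect that finds each residue group's rank-(L//2) element without sorting anything, summing |median - a| over the unsorted group in one pass (expected O(n) selection instead of O(n log n) sorting; measured 1.77x at n=262144).
import Mathlib
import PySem

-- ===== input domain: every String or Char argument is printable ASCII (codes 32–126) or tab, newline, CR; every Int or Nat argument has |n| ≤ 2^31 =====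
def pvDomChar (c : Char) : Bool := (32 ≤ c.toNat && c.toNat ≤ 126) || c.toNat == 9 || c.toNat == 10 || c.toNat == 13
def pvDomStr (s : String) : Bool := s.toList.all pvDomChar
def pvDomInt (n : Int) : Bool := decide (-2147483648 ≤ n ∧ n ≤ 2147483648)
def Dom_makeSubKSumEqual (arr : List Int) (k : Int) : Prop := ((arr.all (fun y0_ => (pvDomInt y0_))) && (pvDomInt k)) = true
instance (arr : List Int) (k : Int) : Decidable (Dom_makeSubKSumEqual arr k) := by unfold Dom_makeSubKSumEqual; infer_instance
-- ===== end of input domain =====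

-- B replaces A's bucket lists and per-bucket full sorts by a 3-way-partition quickselect
-- finding each residue group's rank-(L//2) element, and sums |median - a| over the
-- UNSORTED group; nothing is sorted in B.  A sorts arr in place only in its else-branch,
-- which is unreachable for nonempty arr; the claim is about the return value.

-- ===== PORT A =====
-- Literal port of A.  Internal Python ints that are provably nonnegative (lengths, gcd,
-- i % k, n//k//2) are carried as Nat, on which Python's % and // agree with Nat.mod/div
-- (n % k with k = 0 — reachable only for arr = [] — raises in Python; excluded by Pre_).
-- Python list indexing never raises on the inputs Pre_ admits, so it is ported as
-- List.getD with an irrelevant default.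
def makeSubKSumEqual (arr : List Int) (k : Int) : Int :=
  let n : Nat := arr.length
  let m : Nat := Int.gcd (n : Int) k          -- math.gcd(n, k)
  let k' : Nat := m
  if n % k' == 0 then
    let mid : Nat := n / k' / 2
    let ls0 : List (List Int) := (List.range n).map (fun _ => ([] : List Int))
    -- for i, a in enumerate(arr): ls[i % k].append(a)
    let ls1 := (arr.zipIdx).foldl
      (fun ls p => ls.set (p.2 % k') ((ls.getD (p.2 % k') []) ++ [p.1])) ls0
    -- for i in range(k): ls[i].sort()
    let ls2 := (List.range k').foldl
      (fun ls i => ls.set i (PySem.List.sorted (ls.getD i []) (fun x => x) false)) ls1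
    (List.range k').foldl
      (fun acc i => (ls2.getD i []).foldl
        (fun acc a => acc + |(ls2.getD i []).getD mid 0 - a|) acc) 0
  else
    -- dead code on every input Pre_ admits (gcd(n, k) divides n); ported for completeness
    let arr' := PySem.List.sorted arr (fun x => x) false
    let mid : Nat := n / 2
    arr'.foldl (fun acc a => acc + |arr'.getD mid 0 - a|) 0

-- ===== PORT B =====
-- Hand port of the slice arr[r::g] (exact for 0 ≤ r and step g > 0): structural walk with
-- a countdown — take the element when the countdown is 0, then restart it at g - 1.
def strideAux : List Int → Nat → Nat → List Int
  | [], _, _ => []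
  | a :: t, g, 0 => a :: strideAux t g (g - 1)
  | _ :: t, g, c + 1 => strideAux t g c

-- Port of Source B's select(xs, j): the while loop is this tail recursion (lt/gt shrink
-- strictly).  Python raises IndexError at xs[len(xs)//2] for xs = []; that is unreachable
-- from makeSubKSumEqual_alt on the inputs Pre_ admits and is ported as the default 0.
def qselect (xs : List Int) (j : Nat) : Int :=
  if hx : xs.length = 0 then 0
  else
    let p := xs.getD (xs.length / 2) 0
    let lt := xs.filter (fun a => a < p)
    let gt := xs.filter (fun a => p < a)
    if j < lt.length then qselect lt j
    else if j < xs.length - gt.length then p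
    else qselect gt (j - (xs.length - gt.length))
termination_by xs.length
decreasing_by
  all_goals
    have hmem : xs.getD (xs.length / 2) 0 ∈ xs := by
      rw [List.getD_eq_getElem _ _ (Nat.div_lt_self (Nat.pos_of_ne_zero hx) one_lt_two)]
      exact List.getElem_mem _
    simp only [List.length_unattach]
    refine Nat.lt_of_lt_of_le
      (List.length_filter_lt_length_iff_exists.mpr ⟨⟨_, hmem⟩, List.mem_attach _ _, by simp⟩) ?_
    simp

def makeSubKSumEqual_alt (arr : List Int) (k : Int) : Int :=
  let g : Nat := Int.gcd (arr.length : Int) k   -- math.gcd(len(arr), k)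
  (List.range g).foldl (fun acc r =>
    let grp := strideAux (arr.drop r) g 0       -- arr[r::g]
    let med := qselect grp (grp.length / 2)
    acc + (grp.map (fun a => |med - a|)).sum) 0

-- ===== PRECONDITION & SPEC =====
-- Pre_ excludes only the empty list, on which Python A raises (ZeroDivisionError at n%k
-- when k == 0, IndexError at ls[i] otherwise); A returns normally on every nonempty arr.
def Pre_makeSubKSumEqual (arr : List Int) (k : Int) : Prop := arr ≠ []
instance (arr : List Int) (k : Int) : Decidable (Pre_makeSubKSumEqual arr k) := by
  unfold Pre_makeSubKSumEqual; infer_instance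

def pvWitness_makeSubKSumEqual : List Int × Int := ([1, 5, 2, 9], 2)

def Spec_makeSubKSumEqual (arr : List Int) (k : Int) (out : Int) : Prop := out = makeSubKSumEqual_alt arr k
instance (arr : List Int) (k : Int) (out : Int) : Decidable (Spec_makeSubKSumEqual arr k out) := by unfold Spec_makeSubKSumEqual; infer_instance

-- ===== CLAIM (what is proved, stated in full; the proofs are below) =====
def Claim_equal_makeSubKSumEqual : Prop := ∀ (arr : List Int) (k : Int), Dom_makeSubKSumEqual arr k → Pre_makeSubKSumEqual arr k → Spec_makeSubKSumEqual arr k (makeSubKSumEqual arr k)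

-- ===== LEMMAS AND PROOFS =====

theorem strideAux_skip (g : Nat) : ∀ (u rest : List Int) (c : Nat), u.length ≤ c →
    strideAux (u ++ rest) g c = strideAux rest g (c - u.length) := by
  intro u
  induction u with
  | nil => intro rest c h; simp
  | cons a u' ih =>
    intro rest c h
    match c, h with
    | c' + 1, h =>
      simp only [List.cons_append, strideAux]
      rw [ih rest c' (by simpa using h)]
      simp only [List.length_cons]
      congr 1
      omega

theorem strideAux_block (B rest : List Int) (g j : Nat) (hB : B.length = g) (hj : j < g) :
    strideAux ((B ++ rest).drop j) g 0 = B.getD j 0 :: strideAux (rest.drop j) g 0 := by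
  have hjB : j < B.length := by omega
  rw [List.drop_append, (by omega : j - B.length = 0), List.drop_zero,
      List.drop_eq_getElem_cons hjB]
  simp only [List.cons_append, strideAux]
  rw [List.getD_eq_getElem _ _ hjB]
  congr 1
  have h1 : (B.drop (j+1)).length = g - j - 1 := by simp [hB]; omega
  rw [strideAux_skip g (B.drop (j+1)) rest (g-1) (by omega), h1,
      (by omega : g - 1 - (g - j - 1) = j)]
  by_cases hlen : j ≤ rest.length
  · conv_lhs => rw [← List.take_append_drop j rest]
    rw [strideAux_skip g _ _ j (by simp), List.length_take,
        (by omega : j - min j rest.length = 0)]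
  · rw [List.drop_of_length_le (by omega)]
    conv_lhs => rw [← List.take_append_drop j rest]
    rw [strideAux_skip g _ _ j (by simp), List.drop_of_length_le (by omega)]
    cases h : j - min j rest.length <;> simp [strideAux]

theorem strideAux_length (g : Nat) : ∀ (q : Nat) (xs : List Int) (j : Nat),
    j < g → xs.length = g * q → (strideAux (xs.drop j) g 0).length = q := by
  intro q
  induction q with
  | zero =>
    intro xs j hj hlen
    have : xs = [] := by simpa using hlen
    subst this; simp [strideAux]
  | succ q ih =>
    intro xs j hj hlen
    have hx : xs = xs.take g ++ xs.drop g := (List.take_append_drop g xs).symm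
    rw [hx, strideAux_block _ _ g j (by simp [hlen, Nat.mul_succ]) hj]
    simp only [List.length_cons]
    rw [ih (xs.drop g) j hj (by simp [hlen, Nat.mul_succ])]

theorem fill_partial (g : Nat) : ∀ (B : List Int) (s c : Nat) (ls : List (List Int)),
    s + B.length ≤ g → g ≤ ls.length →
    ((B.zipIdx (c * g + s)).foldl
        (fun ls p => ls.set (p.2 % g) ((ls.getD (p.2 % g) []) ++ [p.1])) ls).length = ls.length ∧
    ∀ j, ((B.zipIdx (c * g + s)).foldl
        (fun ls p => ls.set (p.2 % g) ((ls.getD (p.2 % g) []) ++ [p.1])) ls).getD j []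
      = ls.getD j [] ++ (if s ≤ j ∧ j < s + B.length then [B.getD (j - s) 0] else []) := by
  intro B
  induction B with
  | nil => intro s c ls _ _; simp
  | cons a B' ih =>
    intro s c ls hsb hglen
    have hs : s < g := by simp at hsb; omega
    have hmod : (c * g + s) % g = s := by
      rw [Nat.mul_comm c g, Nat.mul_add_mod]; exact Nat.mod_eq_of_lt hs
    simp only [List.zipIdx_cons, List.foldl_cons, hmod]
    have hstart : c * g + s + 1 = c * g + (s + 1) := by omega
    rw [hstart]
    set ls' := ls.set s ((ls.getD s []) ++ [a]) with hls'
    have hlen' : ls'.length = ls.length := by simp [hls']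
    obtain ⟨ihl, ihg⟩ := ih (s+1) c ls' (by simp at hsb ⊢; omega) (by omega)
    refine ⟨by rw [ihl, hlen'], ?_⟩
    intro j
    have hget' : ∀ j, ls'.getD j [] = ls.getD j [] ++ (if j = s then [a] else []) := by
      intro j
      simp only [hls', List.getD, List.getElem?_set]
      by_cases hj : s = j
      · subst hj
        simp [Nat.lt_of_lt_of_le hs hglen]
      · simp [hj, Ne.symm hj]
    rw [ihg j, hget' j]
    by_cases h1 : j = s
    · subst h1
      rw [if_pos rfl, if_neg (by omega), if_pos (by simp)]
      simp
    · rw [if_neg h1]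
      by_cases h2 : s + 1 ≤ j ∧ j < s + 1 + B'.length
      · rw [if_pos h2, if_pos (by simp only [List.length_cons]; omega)]
        have hge1 : j - s = (j - (s+1)) + 1 := by omega
        rw [hge1]
        simp
      · rw [if_neg h2, if_neg (by simp only [List.length_cons]; omega)]
        simp

theorem fill_blocks (g : Nat) : ∀ (q : Nat) (xs : List Int) (c : Nat)
    (ls : List (List Int)), xs.length = g * q → g ≤ ls.length →
    ((xs.zipIdx (c * g)).foldl
        (fun ls p => ls.set (p.2 % g) ((ls.getD (p.2 % g) []) ++ [p.1])) ls).length = ls.length ∧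
    ∀ j, j < g → ((xs.zipIdx (c * g)).foldl
        (fun ls p => ls.set (p.2 % g) ((ls.getD (p.2 % g) []) ++ [p.1])) ls).getD j []
      = ls.getD j [] ++ strideAux (xs.drop j) g 0 := by
  intro q
  induction q with
  | zero =>
    intro xs c ls hlen _
    have : xs = [] := by simpa using hlen
    subst this
    simp [strideAux]
  | succ q ih =>
    intro xs c ls hlen hglen
    have hxs : xs = xs.take g ++ xs.drop g := (List.take_append_drop g xs).symm
    have hBlen : (xs.take g).length = g := by simp [hlen, Nat.mul_succ]
    have hRlen : (xs.drop g).length = g * q := by simp [hlen, Nat.mul_succ]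
    have hzip : xs.zipIdx (c * g) = (xs.take g).zipIdx (c * g) ++ (xs.drop g).zipIdx ((c + 1) * g) := by
      conv_lhs => rw [hxs]
      rw [List.zipIdx_append, hBlen]
      ring_nf
    rw [hzip, List.foldl_append]
    obtain ⟨pl, pg⟩ := fill_partial g (xs.take g) 0 c ls (by omega) hglen
    rw [(by omega : c * g + 0 = c * g)] at pl pg
    set ls' := ((xs.take g).zipIdx (c * g)).foldl
        (fun ls p => ls.set (p.2 % g) ((ls.getD (p.2 % g) []) ++ [p.1])) ls with hls'
    obtain ⟨il, ig⟩ := ih (xs.drop g) (c + 1) ls' hRlen (by omega)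
    refine ⟨by rw [il, pl], ?_⟩
    intro j hj
    rw [ig j hj, pg j, if_pos ⟨Nat.zero_le j, by omega⟩, Nat.sub_zero]
    conv_rhs => rw [hxs, strideAux_block _ _ g j hBlen hj]
    simp

theorem sort_loop : ∀ (m : Nat) (ls : List (List Int)), m ≤ ls.length →
    ((List.range m).foldl
        (fun ls i => ls.set i (PySem.List.sorted (ls.getD i []) (fun x => x) false)) ls).length = ls.length ∧
    ∀ j, ((List.range m).foldl
        (fun ls i => ls.set i (PySem.List.sorted (ls.getD i []) (fun x => x) false)) ls).getD j []
      = if j < m then PySem.List.sorted (ls.getD j []) (fun x => x) false else ls.getD j [] := by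
  intro m
  induction m with
  | zero => intro ls _; simp
  | succ m ih =>
    intro ls hm
    rw [List.range_succ, List.foldl_append, List.foldl_cons, List.foldl_nil]
    obtain ⟨il, ig⟩ := ih ls (by omega)
    set r := (List.range m).foldl
        (fun ls i => ls.set i (PySem.List.sorted (ls.getD i []) (fun x => x) false)) ls with hr
    have hrm : r.getD m [] = ls.getD m [] := by rw [ig m, if_neg (by omega)]
    refine ⟨by simp [il], ?_⟩
    intro j
    by_cases hj : m = j
    · subst hj
      have hml : m < r.length := by rw [il]; omega
      simp only [List.getD, List.getElem?_set, if_pos hml]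
      simp only [List.getD] at hrm
      rw [hrm, if_pos (Nat.lt_succ_self m)]
      rfl
    · simp only [List.getD, List.getElem?_set, if_neg hj]
      have hig := ig j
      simp only [List.getD] at hig
      rw [hig]
      by_cases hjm : j < m
      · rw [if_pos hjm, if_pos (by omega)]
      · rw [if_neg hjm, if_neg (by omega)]

theorem foldl_body_sum (T : Nat → Int) (F : Int → Nat → Int) :
    ∀ (l : List Nat), (∀ i ∈ l, ∀ acc, F acc i = acc + T i) →
    ∀ acc, l.foldl F acc = acc + (l.map T).sum := by
  intro l
  induction l with
  | nil => intro _ acc; simp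
  | cons i l' ih =>
    intro h acc
    rw [List.foldl_cons, h i (List.mem_cons_self) acc,
        ih (fun j hj => h j (List.mem_cons_of_mem i hj)) (acc + T i)]
    simp [List.map_cons, List.sum_cons]
    ring

-- Trichotomy partition: the three filters of qselect rearrange xs.
theorem perm_filter3 (p : Int) : ∀ xs : List Int,
    ((xs.filter (fun a => a < p)) ++ (xs.filter (fun a => a = p))
      ++ (xs.filter (fun a => p < a))).Perm xs := by
  intro xs
  induction xs with
  | nil => simp
  | cons a t ih =>
    rcases lt_trichotomy a p with h | h | h
    · rw [List.filter_cons, List.filter_cons, List.filter_cons, if_pos (by simpa using h),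
        if_neg (by simpa using ne_of_lt h), if_neg (by simpa using asymm h)]
      simpa using ih.cons a
    · subst h
      rw [List.filter_cons, List.filter_cons, List.filter_cons,
        if_neg (by simpa using lt_irrefl a), if_pos (by simp), if_neg (by simpa using lt_irrefl a)]
      rw [List.append_assoc, List.cons_append]
      refine List.perm_middle.trans (List.Perm.cons a ?_)
      rw [← List.append_assoc]
      exact ih
    · rw [List.filter_cons, List.filter_cons, List.filter_cons, if_neg (by simpa using asymm h),
        if_neg (by simpa using ne_of_gt h), if_pos (by simpa using h)]
      exact List.perm_middle.trans (ih.cons a)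

-- qselect computes the j-th element of the sorted rearrangement without sorting.
theorem qselect_eq_sorted : ∀ (n : Nat) (xs : List Int), xs.length ≤ n →
    ∀ j, j < xs.length →
    qselect xs j = (PySem.List.sorted xs (fun x => x) false).getD j 0 := by
  intro n
  induction n with
  | zero => intro xs hn j hj; omega
  | succ n ih =>
    intro xs hn j hj
    have hne : ¬ xs.length = 0 := by omega
    rw [qselect, dif_neg hne]
    set p := xs.getD (xs.length / 2) 0 with hp
    set l1 := xs.filter (fun a => a < p) with hl1
    set l2 := xs.filter (fun a => a = p) with hl2
    set l3 := xs.filter (fun a => p < a) with hl3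
    have hpmem : p ∈ xs := by
      rw [hp, List.getD_eq_getElem _ _ (Nat.div_lt_self (Nat.pos_of_ne_zero hne) one_lt_two)]
      exact List.getElem_mem _
    have hperm : (l1 ++ l2 ++ l3).Perm xs := perm_filter3 p xs
    have hsum : l1.length + l2.length + l3.length = xs.length := by
      have := hperm.length_eq
      simp only [List.length_append] at this
      omega
    have hl1lt : ∀ a ∈ l1, a < p := by
      intro a ha; rw [hl1] at ha; simpa using (List.mem_filter.mp ha).2
    have hl2eq : ∀ a ∈ l2, a = p := by
      intro a ha; rw [hl2] at ha; simpa using (List.mem_filter.mp ha).2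
    have hl3gt : ∀ a ∈ l3, p < a := by
      intro a ha; rw [hl3] at ha; simpa using (List.mem_filter.mp ha).2
    have hl1len : l1.length < xs.length :=
      List.length_filter_lt_length_iff_exists.mpr ⟨p, hpmem, by simp⟩
    have hl3len : l3.length < xs.length :=
      List.length_filter_lt_length_iff_exists.mpr ⟨p, hpmem, by simp⟩
    set s1 := PySem.List.sorted l1 (fun x => x) false with hs1
    set s3 := PySem.List.sorted l3 (fun x => x) false with hs3
    have hs1len : s1.length = l1.length := PySem.List.length_sorted _ _ _
    have hs3len : s3.length = l3.length := PySem.List.length_sorted _ _ _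
    have hmem1 : ∀ a ∈ s1, a < p := fun a ha => hl1lt a ((PySem.List.sorted_perm l1 _ _).mem_iff.mp ha)
    have hmem3 : ∀ a ∈ s3, p < a := fun a ha => hl3gt a ((PySem.List.sorted_perm l3 _ _).mem_iff.mp ha)
    have hsortEq : PySem.List.sorted xs (fun x => x) false = s1 ++ l2 ++ s3 := by
      apply PySem.List.sorted_id_eq_of_perm_of_pairwise
      · exact ((((PySem.List.sorted_perm l1 _ _).append_right l2).append_right s3).trans
          ((List.Perm.refl (l1 ++ l2)).append (PySem.List.sorted_perm l3 _ _))).trans hperm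
      · rw [List.append_assoc]
        refine List.pairwise_append.mpr ⟨PySem.List.sorted_pairwise _ _, ?_, ?_⟩
        · refine List.pairwise_append.mpr ⟨?_, PySem.List.sorted_pairwise _ _, ?_⟩
          · exact List.pairwise_of_forall_mem_list
              (fun a ha b hb => by rw [hl2eq a ha, hl2eq b hb])
          · intro a ha b hb
            rw [hl2eq a ha]; exact le_of_lt (hmem3 b hb)
        · intro a ha b hb
          rcases List.mem_append.mp hb with hb | hb
          · rw [hl2eq b hb]; exact le_of_lt (hmem1 a ha)
          · exact le_of_lt ((hmem1 a ha).trans (hmem3 b hb))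
    have hl3le : l3.length ≤ xs.length := le_of_lt hl3len
    by_cases h1 : j < l1.length
    · rw [if_pos h1, hsortEq, List.append_assoc]
      have := ih l1 (by omega) j h1
      rw [this, ← hs1]
      simp [List.getD, List.getElem?_append_left (show j < s1.length by omega)]
    · rw [if_neg h1]
      by_cases h2 : j < xs.length - l3.length
      · rw [if_pos h2, hsortEq, List.append_assoc]
        have hj2 : j - s1.length < l2.length := by omega
        rw [show ((s1 ++ (l2 ++ s3)).getD j 0) = (l2 ++ s3).getD (j - s1.length) 0 by
              simp [List.getD, List.getElem?_append_right (show s1.length ≤ j by omega)]]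
        rw [show ((l2 ++ s3).getD (j - s1.length) 0) = l2.getD (j - s1.length) 0 by
              simp [List.getD, List.getElem?_append_left hj2]]
        rw [List.getD_eq_getElem _ _ hj2]
        exact (hl2eq _ (List.getElem_mem _)).symm
      · rw [if_neg h2, hsortEq, List.append_assoc]
        have hji : j - (xs.length - l3.length) < l3.length := by omega
        have := ih l3 (by omega) (j - (xs.length - l3.length)) hji
        rw [this, ← hs3]
        rw [show ((s1 ++ (l2 ++ s3)).getD j 0) = (l2 ++ s3).getD (j - s1.length) 0 by
              simp [List.getD, List.getElem?_append_right (show s1.length ≤ j by omega)]]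
        rw [show ((l2 ++ s3).getD (j - s1.length) 0) = s3.getD (j - s1.length - l2.length) 0 by
              simp [List.getD, List.getElem?_append_right (show l2.length ≤ j - s1.length by omega)]]
        congr 1
        omega

theorem makeSubKSumEqual_main : ∀ (arr : List Int) (k : Int), arr ≠ [] →
    makeSubKSumEqual arr k = makeSubKSumEqual_alt arr k := by
  intro arr k hne
  have hnpos : 0 < arr.length := List.length_pos_of_ne_nil hne
  simp only [makeSubKSumEqual, makeSubKSumEqual_alt]
  set g : Nat := Int.gcd (arr.length : Int) k with hgdef
  have hgpos : 0 < g := by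
    rcases Nat.eq_zero_or_pos g with h0 | h
    · exfalso
      rw [hgdef] at h0
      have h1 : (arr.length : Int) = 0 := (Int.gcd_eq_zero_iff.mp h0).1
      have h2 : arr.length = 0 := by exact_mod_cast h1
      omega
    · exact h
  have hdvd : g ∣ arr.length := by
    have h1 : (g : Int) ∣ (arr.length : Int) := by rw [hgdef]; exact Int.gcd_dvd_left _ _
    exact_mod_cast h1
  obtain ⟨q, hq⟩ := hdvd
  have hqpos : 0 < q := by
    rcases Nat.eq_zero_or_pos q with rfl | h
    · rw [Nat.mul_zero] at hq; omega
    · exact h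
  have hglen : g ≤ arr.length := Nat.le_of_dvd hnpos ⟨q, hq⟩
  have hcond : (arr.length % g == 0) = true := by rw [hq, Nat.mul_mod_right]; rfl
  rw [if_pos hcond]
  have hmid : arr.length / g / 2 = q / 2 := by
    rw [hq, Nat.mul_div_cancel_left q hgpos]
  set ls0 : List (List Int) := (List.range arr.length).map (fun _ => ([] : List Int)) with hls0
  have hls0len : ls0.length = arr.length := by simp [hls0]
  have hls0get : ∀ j, ls0.getD j [] = [] := by intro j; simp [hls0, List.getD]
  set ls1 := (arr.zipIdx 0).foldl
      (fun ls p => ls.set (p.2 % g) ((ls.getD (p.2 % g) []) ++ [p.1])) ls0 with hls1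
  set ls2 := (List.range g).foldl
      (fun ls i => ls.set i (PySem.List.sorted (ls.getD i []) (fun x => x) false)) ls1 with hls2
  obtain ⟨fl, fg⟩ := fill_blocks g q arr 0 ls0 hq (by omega)
  rw [Nat.zero_mul] at fl fg
  rw [← hls1] at fl fg
  obtain ⟨sl, sg⟩ := sort_loop g ls1 (by omega)
  rw [← hls2] at sl sg
  have hbucket : ∀ i, i < g →
      ls2.getD i [] = PySem.List.sorted (strideAux (arr.drop i) g 0) (fun x => x) false := by
    intro i hi
    rw [sg i, if_pos hi, fg i hi, hls0get i, List.nil_append]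
  have hslen : ∀ i, i < g →
      (PySem.List.sorted (strideAux (arr.drop i) g 0) (fun x => x) false).length = q := by
    intro i hi
    rw [PySem.List.length_sorted]
    exact strideAux_length g q arr i hi hq
  have hA : ∀ i ∈ List.range g, ∀ acc : Int,
      (ls2.getD i []).foldl
          (fun acc a => acc + |(ls2.getD i []).getD (arr.length / g / 2) 0 - a|) acc
        = acc + ((ls2.getD i []).map
            (fun a => |(ls2.getD i []).getD (arr.length / g / 2) 0 - a|)).sum := by
    intro i _ acc
    exact PySem.List.foldl_add _ _ _
  have hB : ∀ r ∈ List.range g, ∀ acc : Int,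
      acc + ((strideAux (arr.drop r) g 0).map
          (fun a => |qselect (strideAux (arr.drop r) g 0)
            ((strideAux (arr.drop r) g 0).length / 2) - a|)).sum
        = acc + ((strideAux (arr.drop r) g 0).map
          (fun a => |qselect (strideAux (arr.drop r) g 0)
            ((strideAux (arr.drop r) g 0).length / 2) - a|)).sum := by
    intro r _ acc; rfl
  rw [foldl_body_sum _ _ (List.range g) hA 0, foldl_body_sum _ _ (List.range g) hB 0]
  have hTT : ∀ i ∈ List.range g,
      ((ls2.getD i []).map
          (fun a => |(ls2.getD i []).getD (arr.length / g / 2) 0 - a|)).sum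
        = ((strideAux (arr.drop i) g 0).map
          (fun a => |qselect (strideAux (arr.drop i) g 0)
            ((strideAux (arr.drop i) g 0).length / 2) - a|)).sum := by
    intro i hi
    have hig : i < g := List.mem_range.mp hi
    set grp := strideAux (arr.drop i) g 0 with hgrp
    set s := PySem.List.sorted grp (fun x => x) false with hs
    have hgl : grp.length = q := strideAux_length g q arr i hig hq
    have hsl : s.length = q := hslen i hig
    have hmed : qselect grp (grp.length / 2) = s.getD (q / 2) 0 := by
      rw [hgl]
      exact qselect_eq_sorted grp.length grp le_rfl (q / 2) (by rw [hgl]; omega)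
    rw [hbucket i hig, ← hs, hmid, hmed]
    exact ((PySem.List.sorted_perm grp (fun x => x) false).map
      (fun a => |s.getD (q / 2) 0 - a|)).sum_eq
  rw [List.map_congr_left hTT]

-- ===== VERDICT (by name: the statement is the Claim_ definition above) =====
theorem makeSubKSumEqual_spec : Claim_equal_makeSubKSumEqual := by
  intro arr k _ hpre
  exact makeSubKSumEqual_main arr k hpre
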